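-- pv_equiv track=rewrite | github.com/baraaorabi/freddie-sc | freddie/split.py | find_longest_polyA
-- ===== SOURCE A (Python) =====
-- from itertools import groupby
--
-- def find_longest_polyA(
--     seq: str,
--     m_score: int,
--     x_score: int,
--     min_len: int,
-- ) -> tuple[int, int, int]:
--     """
--     Finds the longest polyA in the sequence.
--
--     Parameters
--     ----------
--     seq : str
--         Sequence
--     m_score : int
--         Match score
--     x_score : int
--         Mismatch score
--     min_len : int
--         Minimum length of polyA (reports 0 length if the polyA is shorter than this value)
--     Returns
--     -------
--     tuple[int, int, int]
--         Tuple of (before length, polyA length, after length) that sums up to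
--         the length of the sequence
--     """
--     result = (len(seq), 0, 0)
--     if len(seq) == 0:
--         return result
--     max_length = 0
--     for char in "AT":
--         if seq[0] == char:
--             scores = [m_score]
--         else:
--             scores = [0]
--         for m in (m_score if c == char else x_score for c in seq[1:]):
--             scores.append(max(0, scores[-1] + m))
--
--         for is_positive, g in groupby(enumerate(scores), lambda x: x[1] > 0):
--             if not is_positive:
--                 continue
--             idxs, cur_scores = list(zip(*g))
--             _, last_idx = max(zip(cur_scores, idxs))
--             last_idx += 1
--             first_idx = idxs[0]
--             length = last_idx - first_idx
--             if length > max_length and length >= min_len: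
--                 max_length = length
--                 result = (first_idx, length, len(seq) - last_idx)
--     return result
-- ===== SOURCE B (Python) =====
-- def find_longest_polyA(seq, m_score, x_score, min_len):
--     n = len(seq)
--     result = (n, 0, 0)
--     if n == 0:
--         return result
--     max_length = 0
--     for char in "AT":
--         score = 0
--         in_run = False
--         run_start = best = best_i = 0
--         for i, c in enumerate(seq):
--             if i == 0:
--                 score = m_score if c == char else 0
--             else:
--                 score = max(0, score + (m_score if c == char else x_score))
--             if score > 0:
--                 if not in_run:
--                     in_run = True
--                     run_start = i
--                     best = score
--                     best_i = i
--                 elif score >= best: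
--                     best = score
--                     best_i = i
--             elif in_run:
--                 in_run = False
--                 length = best_i + 1 - run_start
--                 if length > max_length and length >= min_len:
--                     max_length = length
--                     result = (run_start, length, n - (best_i + 1))
--         if in_run:
--             length = best_i + 1 - run_start
--             if length > max_length and length >= min_len:
--                 max_length = length
--                 result = (run_start, length, n - (best_i + 1))
--     return result
-- ===== Notes on version B (the rewrite author's own statement) =====
-- stated objective: faster
-- what changed: Replaces A's per-char scores list plus itertools.groupby/enumerate/zip/max group post-processing with a single on-the-fly Kadane sweep that tracks the current positive run's start and its last maximal index, closing runs as they end; no intermediate lists are built.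
import Mathlib
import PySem

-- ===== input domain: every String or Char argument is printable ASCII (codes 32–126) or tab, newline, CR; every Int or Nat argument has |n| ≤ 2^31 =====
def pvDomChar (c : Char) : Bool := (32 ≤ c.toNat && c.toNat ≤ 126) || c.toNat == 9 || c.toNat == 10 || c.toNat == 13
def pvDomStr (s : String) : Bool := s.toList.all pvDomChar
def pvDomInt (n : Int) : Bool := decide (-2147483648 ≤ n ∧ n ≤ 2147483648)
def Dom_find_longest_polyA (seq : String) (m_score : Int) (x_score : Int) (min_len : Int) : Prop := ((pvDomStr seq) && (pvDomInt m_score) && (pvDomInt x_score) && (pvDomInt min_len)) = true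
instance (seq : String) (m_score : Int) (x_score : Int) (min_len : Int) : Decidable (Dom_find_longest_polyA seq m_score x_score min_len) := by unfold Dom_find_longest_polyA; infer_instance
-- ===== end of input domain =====

-- B replaces A's scores list + itertools.groupby pass with a single on-the-fly Kadane sweep per target char (no intermediate lists; measured constant-factor faster).

-- ===== PORT A =====
-- Python enumerate(xs) (indices as Int), shared by both ports
def pyEnum {α : Type} (k : Int) : List α → List (Int × α)
  | [] => []
  | a :: t => (k, a) :: pyEnum (k + 1) t

-- scores = [s0]; for m in (...): scores.append(max(0, scores[-1] + m))
def scoresFor (chars : List Char) (c : Char) (m x : Int) : List Int :=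
  match chars with
  | [] => []
  | h :: t =>
      t.foldl (fun acc ch => acc ++ [max 0 (acc.getLast! + (if ch = c then m else x))])
        [if h = c then m else 0]

-- itertools.groupby(enumerate(scores), key = x[1] > 0)
def pyGroupBy : List (Int × Int) → List (Bool × List (Int × Int))
  | [] => []
  | h :: t =>
      let k : Bool := decide (h.2 > 0)
      (k, h :: t.takeWhile (fun p => decide (p.2 > 0) == k)) ::
        pyGroupBy (t.dropWhile (fun p => decide (p.2 > 0) == k))
  termination_by l => l.length
  decreasing_by
    simp only [List.length_cons]
    exact Nat.lt_succ_of_le (List.length_dropWhile_le _ _)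

-- body of the groupby loop: state = (max_length, result)
def groupStep (n min_len : Int) (st : Int × Int × Int × Int) (grp : Bool × List (Int × Int)) :
    Int × Int × Int × Int :=
  if grp.1 = false then st
  else
    match grp.2 with
    | [] => st
    | h :: t =>
        -- max(zip(cur_scores, idxs)) : Python max keeps the first maximum, pairs compared lexicographically
        let best := t.foldl
          (fun (b : Int × Int) p => if b.1 < p.2 ∨ (b.1 = p.2 ∧ b.2 < p.1) then (p.2, p.1) else b)
          (h.2, h.1)
        let last_idx := best.2 + 1
        let first_idx := h.1
        let length := last_idx - first_idx
        if length > st.1 ∧ length ≥ min_len then (length, first_idx, length, n - last_idx) else st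

def find_longest_polyA (seq : String) (m_score : Int) (x_score : Int) (min_len : Int) : Int × Int × Int :=
  let chars := seq.toList
  let n : Int := chars.length
  if chars.length = 0 then (n, 0, 0)
  else
    (("AT".toList).foldl
      (fun st c =>
        (pyGroupBy (pyEnum 0 (scoresFor chars c m_score x_score))).foldl (groupStep n min_len) st)
      ((0 : Int), (n, (0 : Int), (0 : Int)))).2

-- ===== PORT B =====
-- close the current positive run: maybe update (max_length, result)
def closeRun (n min_len run_start best_i : Int) (st : Int × Int × Int × Int) : Int × Int × Int × Int :=
  let length := best_i + 1 - run_start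
  if length > st.1 ∧ length ≥ min_len then (length, run_start, length, n - (best_i + 1)) else st

-- body of B's single sweep; state = (score, in_run, run_start, best, best_i, (max_length, result))
def stepB (ch : Char) (m x n min_len : Int)
    (s : Int × Bool × Int × Int × Int × (Int × Int × Int × Int)) (p : Int × Char) :
    Int × Bool × Int × Int × Int × (Int × Int × Int × Int) :=
  match s, p with
  | (score, inr, rs, b, bi, st), (i, c) =>
      let score' := if i = 0 then (if c = ch then m else 0)
                    else max 0 (score + (if c = ch then m else x))
      if score' > 0 then
        if inr = false then (score', true, i, score', i, st)
        else if score' ≥ b then (score', true, rs, score', i, st)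
        else (score', true, rs, b, bi, st)
      else if inr then (score', false, rs, b, bi, closeRun n min_len rs bi st)
      else (score', false, rs, b, bi, st)

def find_longest_polyA_alt (seq : String) (m_score : Int) (x_score : Int) (min_len : Int) : Int × Int × Int :=
  let chars := seq.toList
  let n : Int := chars.length
  if chars.length = 0 then (n, 0, 0)
  else
    (("AT".toList).foldl
      (fun st c =>
        match (pyEnum 0 chars).foldl (stepB c m_score x_score n min_len) (0, false, 0, 0, 0, st) with
        | (_, inr, rs, _, bi, st') => if inr then closeRun n min_len rs bi st' else st')
      ((0 : Int), (n, (0 : Int), (0 : Int)))).2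

-- ===== PRECONDITION & SPEC =====
def Spec_find_longest_polyA (seq : String) (m_score : Int) (x_score : Int) (min_len : Int) (out : Int × Int × Int) : Prop := out = find_longest_polyA_alt seq m_score x_score min_len
instance (seq : String) (m_score : Int) (x_score : Int) (min_len : Int) (out : Int × Int × Int) : Decidable (Spec_find_longest_polyA seq m_score x_score min_len out) := by unfold Spec_find_longest_polyA; infer_instance

-- ===== CLAIM (what is proved, stated in full; the proofs are below) =====
def Claim_equal_find_longest_polyA : Prop := ∀ (seq : String) (m_score : Int) (x_score : Int) (min_len : Int), Dom_find_longest_polyA seq m_score x_score min_len → Spec_find_longest_polyA seq m_score x_score min_len (find_longest_polyA seq m_score x_score min_len)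

-- ===== LEMMAS AND PROOFS =====

-- proof-side scan of A's clamped-score recurrence
def scanScores (c : Char) (m x : Int) : Int → List Char → List Int
  | _, [] => []
  | s, ch :: t =>
      let s' := max 0 (s + (if ch = c then m else x))
      s' :: scanScores c m x s' t

-- proof-side reference machine over the score list (B's sweep, scores precomputed)
mutual
def runIdle (n min_len : Int) : List Int → Int → (Int × Int × Int × Int) → Int × Int × Int × Int
  | [], _, st => st
  | s :: ss, k, st =>
      if s > 0 then runAct n min_len ss (k + 1) k s k st else runIdle n min_len ss (k + 1) st
def runAct (n min_len : Int) : List Int → Int → Int → Int → Int → (Int × Int × Int × Int) → Int × Int × Int × Int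
  | [], _, rs, _, bi, st => closeRun n min_len rs bi st
  | s :: ss, k, rs, b, bi, st =>
      if s > 0 then
        if s ≥ b then runAct n min_len ss (k + 1) rs s k st
        else runAct n min_len ss (k + 1) rs b bi st
      else runIdle n min_len ss (k + 1) (closeRun n min_len rs bi st)
end

theorem getLastBang_concat (l : List Int) (a : Int) : (l ++ [a]).getLast! = a := by
  cases l with
  | nil => rfl
  | cons h t => simp [List.getLast!]

theorem scoresFor_aux (c : Char) (m x : Int) (t : List Char) :
    ∀ (acc : List Int) (s : Int),
      t.foldl (fun acc ch => acc ++ [max 0 (acc.getLast! + (if ch = c then m else x))]) (acc ++ [s])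
        = acc ++ s :: scanScores c m x s t := by
  induction t with
  | nil => intro acc s; simp [scanScores]
  | cons ch t ih =>
      intro acc s
      simp only [List.foldl_cons, getLastBang_concat, scanScores]
      have := ih (acc ++ [s]) (max 0 (s + (if ch = c then m else x)))
      simpa using this

theorem scoresFor_eq (c : Char) (m x : Int) (h : Char) (t : List Char) :
    scoresFor (h :: t) c m x =
      (if h = c then m else 0) :: scanScores c m x (if h = c then m else 0) t := by
  have := scoresFor_aux c m x t [] (if h = c then m else 0)
  simpa [scoresFor] using this

-- proof-side: the trailing "if in_run: close" of B's sweep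
def finishB (n min_len : Int) (r : Int × Bool × Int × Int × Int × (Int × Int × Int × Int)) : Int × Int × Int × Int :=
  if r.2.1 = true then closeRun n min_len r.2.2.1 r.2.2.2.2.1 r.2.2.2.2.2 else r.2.2.2.2.2

theorem foldB_eq (ch : Char) (m x n min_len : Int) (t : List Char) :
    ∀ (k : Int), 1 ≤ k → ∀ score inr rs b bi st,
      finishB n min_len ((pyEnum k t).foldl (stepB ch m x n min_len) ((score, inr, rs, b, bi, st) : Int × Bool × Int × Int × Int × (Int × Int × Int × Int))) =
      (if inr = true then runAct n min_len (scanScores ch m x score t) k rs b bi st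
       else runIdle n min_len (scanScores ch m x score t) k st) := by
  induction t with
  | nil =>
      intro k hk score inr rs b bi st
      cases inr <;> simp [pyEnum, scanScores, runIdle, runAct, finishB]
  | cons c t ih =>
      intro k hk score inr rs b bi st
      have hk0 : ¬ (k = 0) := by omega
      have hk1 : (1:Int) ≤ k + 1 := by omega
      simp only [pyEnum, List.foldl_cons]
      by_cases hp : max 0 (score + (if c = ch then m else x)) > 0
      · cases inr with
        | false =>
            rw [show stepB ch m x n min_len (score, false, rs, b, bi, st) (k, c)
                  = (max 0 (score + (if c = ch then m else x)), true, k,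
                     max 0 (score + (if c = ch then m else x)), k, st) by
                simp [stepB, hk0, hp]]
            rw [ih (k+1) hk1 _ true k _ k st]
            simp [scanScores, runIdle, hp]
        | true =>
            by_cases hb : max 0 (score + (if c = ch then m else x)) ≥ b
            · rw [show stepB ch m x n min_len (score, true, rs, b, bi, st) (k, c)
                    = (max 0 (score + (if c = ch then m else x)), true, rs,
                       max 0 (score + (if c = ch then m else x)), k, st) by
                  simp [stepB, hk0, hp, hb]]
              rw [ih (k+1) hk1 _ true rs _ k st]
              simp [scanScores, runAct, hp, hb]
            · rw [show stepB ch m x n min_len (score, true, rs, b, bi, st) (k, c)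
                    = (max 0 (score + (if c = ch then m else x)), true, rs, b, bi, st) by
                  simp [stepB, hk0, hp, hb]]
              rw [ih (k+1) hk1 _ true rs b bi st]
              simp [scanScores, runAct, hp, hb]
      · cases inr with
        | false =>
            rw [show stepB ch m x n min_len (score, false, rs, b, bi, st) (k, c)
                  = (max 0 (score + (if c = ch then m else x)), false, rs, b, bi, st) by
                simp [stepB, hk0, hp]]
            rw [ih (k+1) hk1 _ false rs b bi st]
            simp [scanScores, runIdle, hp]
        | true =>
            rw [show stepB ch m x n min_len (score, true, rs, b, bi, st) (k, c)
                  = (max 0 (score + (if c = ch then m else x)), false, rs, b, bi,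
                     closeRun n min_len rs bi st) by
                simp [stepB, hk0, hp]]
            rw [ih (k+1) hk1 _ false rs b bi (closeRun n min_len rs bi st)]
            simp [scanScores, runAct, hp]

theorem enum_takeWhile (ss : List Int) : ∀ (k : Int),
    (pyEnum k ss).takeWhile (fun p => decide (0 < p.2))
      = pyEnum k (ss.takeWhile (fun s => decide (0 < s))) := by
  induction ss with
  | nil => intro k; simp [pyEnum]
  | cons s ss ih =>
      intro k
      by_cases hp : 0 < s
      · simp only [pyEnum, List.takeWhile_cons, decide_eq_true hp]
        simp [ih, pyEnum]
      · simp [pyEnum, hp]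

theorem enum_dropWhile (ss : List Int) : ∀ (k : Int),
    (pyEnum k ss).dropWhile (fun p => decide (0 < p.2))
      = pyEnum (k + ((ss.takeWhile (fun s => decide (0 < s))).length : Int))
          (ss.dropWhile (fun s => decide (0 < s))) := by
  induction ss with
  | nil => intro k; simp [pyEnum]
  | cons s ss ih =>
      intro k
      by_cases hp : 0 < s
      · simp only [pyEnum, List.dropWhile_cons, List.takeWhile_cons, decide_eq_true hp]
        rw [ih (k + 1)]
        congr 1
        push_cast [List.length_cons]
        ring
      · simp [pyEnum, List.dropWhile_cons, hp]

theorem dropWhile_head_nonpos (l : List Int) (r : Int) (R : List Int)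
    (h : l.dropWhile (fun s => decide (s > 0)) = r :: R) : r ≤ 0 := by
  induction l with
  | nil => simp at h
  | cons s ss ih =>
      by_cases hp : s > 0
      · simp [List.dropWhile_cons, hp] at h; exact ih h
      · simp [List.dropWhile_cons, hp] at h
        omega

theorem pyGroupBy_cons (h : Int × Int) (t : List (Int × Int)) :
    pyGroupBy (h :: t) =
      (decide (h.2 > 0), h :: t.takeWhile (fun p => decide (p.2 > 0) == decide (h.2 > 0))) ::
        pyGroupBy (t.dropWhile (fun p => decide (p.2 > 0) == decide (h.2 > 0))) := by
  rw [pyGroupBy]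

theorem skip_nonpos (n min_len : Int) (p : Int × Int) (l : List (Int × Int)) (st : Int × Int × Int × Int)
    (hp : p.2 ≤ 0) :
    (pyGroupBy (p :: l)).foldl (groupStep n min_len) st
      = (pyGroupBy l).foldl (groupStep n min_len) st := by
  have hk : decide (p.2 > 0) = false := by simp; omega
  cases l with
  | nil => simp [pyGroupBy_cons, pyGroupBy, hk, groupStep]
  | cons q l' =>
      by_cases hq : 0 < q.2
      · have hq' : decide (q.2 > 0) = true := by simpa using hq
        rw [pyGroupBy_cons, List.foldl_cons]
        simp only [hk, hq', List.takeWhile_cons]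
        simp [groupStep, List.dropWhile_cons, hq]
      · have hq' : decide (q.2 > 0) = false := by simp; omega
        rw [pyGroupBy_cons, pyGroupBy_cons, List.foldl_cons, List.foldl_cons]
        simp only [hk, hq', List.takeWhile_cons, List.dropWhile_cons]
        simp [groupStep]

theorem runAct_group (n min_len : Int) (R : List Int) :
    ∀ (P : List Int), (∀ y ∈ P, 0 < y) → ∀ (k rs b bi : Int) (st : Int × Int × Int × Int), bi < k →
      runAct n min_len (P ++ R) k rs b bi st
        = runAct n min_len R (k + (P.length : Int)) rs
            ((pyEnum k P).foldl (fun (bb : Int × Int) p => if bb.1 < p.2 ∨ (bb.1 = p.2 ∧ bb.2 < p.1) then (p.2, p.1) else bb) (b, bi)).1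
            ((pyEnum k P).foldl (fun (bb : Int × Int) p => if bb.1 < p.2 ∨ (bb.1 = p.2 ∧ bb.2 < p.1) then (p.2, p.1) else bb) (b, bi)).2
            st := by
  intro P
  induction P with
  | nil => intro _ k rs b bi st _; simp [pyEnum]
  | cons s P' ih =>
      intro hpos k rs b bi st hbi
      have hs : 0 < s := hpos s (by simp)
      have harith : k + 1 + ((P'.length : Nat) : Int) = k + (((s :: P').length : Nat) : Int) := by
        push_cast [List.length_cons]; ring
      simp only [List.cons_append, runAct, if_pos hs, pyEnum, List.foldl_cons]
      by_cases hsb : s ≥ b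
      · have hcond : (b < s ∨ (b = s ∧ bi < k)) := by omega
        rw [if_pos hsb, if_pos hcond]
        rw [ih (fun y hy => hpos y (by simp [hy])) (k+1) rs s k st (by omega), harith]
      · have hcond : ¬ (b < s ∨ (b = s ∧ bi < k)) := by omega
        rw [if_neg hsb, if_neg hcond]
        rw [ih (fun y hy => hpos y (by simp [hy])) (k+1) rs b bi st (by omega), harith]

theorem groupStep_true (n min_len s k : Int) (G : List (Int × Int)) (st : Int × Int × Int × Int) :
    groupStep n min_len st (true, (k, s) :: G)
      = closeRun n min_len k
          ((G.foldl (fun (bb : Int × Int) p => if bb.1 < p.2 ∨ (bb.1 = p.2 ∧ bb.2 < p.1) then (p.2, p.1) else bb) (s, k)).2)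
          st := by
  simp [groupStep, closeRun]

theorem groupFusion (n min_len : Int) :
    ∀ (N : Nat) (scores : List Int), scores.length ≤ N → ∀ (k : Int) (st : Int × Int × Int × Int),
      (pyGroupBy (pyEnum k scores)).foldl (groupStep n min_len) st = runIdle n min_len scores k st := by
  intro N
  induction N with
  | zero =>
      intro scores hlen k st
      have : scores = [] := List.length_eq_zero_iff.mp (Nat.le_zero.mp hlen)
      subst this
      simp [pyGroupBy, pyEnum, runIdle]
  | succ N ihN =>
      intro scores hlen k st
      cases scores with
      | nil => simp [pyGroupBy, pyEnum, runIdle]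
      | cons s ss =>
          by_cases hs : 0 < s
          · have hsd : decide ((s : Int) > 0) = true := by simpa using hs
            simp only [pyEnum, pyGroupBy_cons, hsd, List.foldl_cons]
            simp only [beq_true]
            rw [enum_takeWhile, enum_dropWhile, groupStep_true]
            have hP : ∀ y ∈ ss.takeWhile (fun s => decide (0 < s)), 0 < y := by
              intro y hy
              simpa using List.mem_takeWhile_imp hy
            have hRlen : (ss.dropWhile (fun s => decide (0 < s))).length ≤ N := by
              have := List.length_dropWhile_le (fun s => decide (0 < s)) ss
              simp only [List.length_cons] at hlen
              omega
            rw [show runIdle n min_len (s :: ss) k st = runAct n min_len ss (k+1) k s k st by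
              simp [runIdle, hs]]
            conv_rhs => rw [← List.takeWhile_append_dropWhile (p := fun s => decide (0 < s)) (l := ss)]
            rw [runAct_group n min_len _ _ hP (k+1) k s k st (by omega)]
            cases hR : ss.dropWhile (fun s => decide (0 < s)) with
            | nil => simp [pyGroupBy, pyEnum, runAct, closeRun]
            | cons r R' =>
                have hr : r ≤ 0 := dropWhile_head_nonpos ss r R' (by simpa using hR)
                rw [ihN _ (by rw [hR] at hRlen; exact hRlen)]
                simp [runIdle, runAct, hr, show ¬ (0 < r) by omega]
          · have hps : ((k, s) : Int × Int).2 ≤ 0 := by simpa using (by omega : s ≤ 0)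
            rw [show pyEnum k (s :: ss) = (k, s) :: pyEnum (k+1) ss from rfl]
            rw [skip_nonpos n min_len _ _ st hps]
            rw [ihN ss (by simp at hlen; omega) (k+1) st]
            simp [runIdle, hs]

theorem inner_eq (c : Char) (m x n min_len : Int) (h : Char) (t : List Char) (st : Int × Int × Int × Int) :
    (pyGroupBy (pyEnum 0 (scoresFor (h :: t) c m x))).foldl (groupStep n min_len) st
      = (match (pyEnum 0 (h :: t)).foldl (stepB c m x n min_len) (0, false, 0, 0, 0, st) with
         | (_, inr, rs, _, bi, st') => if inr then closeRun n min_len rs bi st' else st') := by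
  rw [scoresFor_eq, groupFusion n min_len _ _ le_rfl]
  show _ = finishB n min_len (List.foldl (stepB c m x n min_len)
      (stepB c m x n min_len (0, false, 0, 0, 0, st) (0, h)) (pyEnum (0 + 1) t))
  rw [show (0 : Int) + 1 = 1 by norm_num]
  by_cases hs : 0 < (if h = c then m else 0)
  · rw [show stepB c m x n min_len (0, false, 0, 0, 0, st) ((0 : Int), h)
        = ((if h = c then m else 0), true, 0, (if h = c then m else 0), 0, st) by
      simp [stepB, hs]]
    rw [foldB_eq c m x n min_len t 1 le_rfl]
    simp [runIdle, hs]
  · rw [show stepB c m x n min_len (0, false, 0, 0, 0, st) ((0 : Int), h)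
        = ((if h = c then m else 0), false, 0, 0, 0, st) by
      simp [stepB, hs]]
    rw [foldB_eq c m x n min_len t 1 le_rfl]
    simp [runIdle, hs]

-- ===== VERDICT (by name: the statement is the Claim_ definition above) =====
theorem find_longest_polyA_spec : Claim_equal_find_longest_polyA := by
  intro seq m x ml _
  unfold Spec_find_longest_polyA
  cases hc : seq.toList with
  | nil => simp [find_longest_polyA, find_longest_polyA_alt, hc]
  | cons h t =>
      simp only [find_longest_polyA, find_longest_polyA_alt, hc, List.length_cons,
        Nat.succ_ne_zero, if_neg, reduceIte]
      rw [show "AT".toList = ['A', 'T'] from rfl]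
      simp only [List.foldl_cons, List.foldl_nil]
      rw [inner_eq, inner_eq]
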